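-- pv_equiv track=rewrite | github.com/bichngocdo/pp-attachment-candidate-extraction | pp_extract_candidate.py | is_in_sub_clause
-- ===== SOURCE A (Python) =====
-- TF_COL = -1
--
-- def is_in_sub_clause(block, i):
--     j = i - 1
--     while j >= 0:
--         if block[j][TF_COL] == 'C':
--             return True
--         if block[j][TF_COL] == 'LK':
--             break
--         j -= 1
--     return False
-- ===== SOURCE B (Python) =====
-- TF_COL = -1
--
-- def is_in_sub_clause(block, i):
--     # Forward pass: tags of the first i rows (a fieldless row has no tag -> '').
--     tags = [(row[TF_COL] if row else '') for row in block[:max(i, 0)]]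
--     boundary = -1
--     for k, tag in enumerate(tags):
--         if tag == 'LK':
--             boundary = k
--     return 'C' in tags[boundary + 1:]
-- ===== Notes on version B (the rewrite author's own statement) =====
-- stated objective: alternative
-- what changed: A's single backward early-exit scan from i-1 is replaced by a forward pass over block[:i] that records the last 'LK' boundary, followed by a forward existence check for 'C' strictly after that boundary.
import Mathlib
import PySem

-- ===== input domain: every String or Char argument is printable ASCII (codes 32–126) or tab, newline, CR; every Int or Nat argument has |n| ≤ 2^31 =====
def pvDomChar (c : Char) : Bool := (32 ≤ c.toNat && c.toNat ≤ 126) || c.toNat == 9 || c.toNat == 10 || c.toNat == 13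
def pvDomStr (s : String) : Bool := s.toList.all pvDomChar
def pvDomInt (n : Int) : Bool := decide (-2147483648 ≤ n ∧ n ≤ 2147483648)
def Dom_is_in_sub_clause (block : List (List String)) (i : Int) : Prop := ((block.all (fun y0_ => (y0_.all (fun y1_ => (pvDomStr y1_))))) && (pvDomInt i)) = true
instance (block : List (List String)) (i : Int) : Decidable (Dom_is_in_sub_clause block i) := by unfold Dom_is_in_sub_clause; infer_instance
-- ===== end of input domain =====

-- B replaces A's backward early-exit scan with a forward boundary-finding pass (last 'LK'
-- before i) followed by a forward 'C'-existence check after that boundary; objective: alternative.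

-- ===== PORT A =====
-- backward while-loop; fuel n encodes "next index to inspect is n-1"; the `none`
-- branches (row lookup failing = Python IndexError) are excluded by Pre_ below
def isicGo (block : List (List String)) : Nat → Bool
  | 0 => false
  | n+1 =>
    match PySem.List.pyGet? block (n : Int) with
    | none => false
    | some row =>
      match PySem.List.pyGet? row (-1 : Int) with
      | none => false
      | some tag =>
        if tag = "C" then true
        else if tag = "LK" then false
        else isicGo block n

def is_in_sub_clause (block : List (List String)) (i : Int) : Bool :=
  isicGo block i.toNat

-- ===== PORT B =====
-- `row[-1] if row else ''` is `(PySem.List.pyGet? row (-1)).getD ""` (none exactly on [])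
def is_in_sub_clause_alt (block : List (List String)) (i : Int) : Bool :=
  let tags := (PySem.List.slice block none (some (max i 0))).map
      (fun row => (PySem.List.pyGet? row (-1 : Int)).getD "")
  let boundary : Int := (PySem.List.enumerate tags 0).foldl
      (fun b kt => if kt.2 = "LK" then kt.1 else b) (-1)
  (PySem.List.slice tags (some (boundary + 1)) none).contains "C"

-- ===== PRECONDITION & SPEC =====
-- Pre_ excludes exactly the inputs on which Python A raises IndexError: i > len(block)
-- (the first index i-1 is already out of range), or some fieldless row at an index k < i
-- is unprotected, i.e. no row strictly between k and i carries tag 'C' or 'LK' (A's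
-- backward scan then reaches row k and block[k][-1] raises). Everywhere A returns, B matches.
def Pre_is_in_sub_clause (block : List (List String)) (i : Int) : Prop :=
  i ≤ (block.length : Int) ∧
  ∀ k : Nat, k < i.toNat → block[k]? = some ([] : List String) →
    ∃ m : Nat, m < i.toNat ∧ k < m ∧
      (block[m]?.bind List.getLast? = some "C" ∨
       block[m]?.bind List.getLast? = some "LK")

instance (block : List (List String)) (i : Int) : Decidable (Pre_is_in_sub_clause block i) := by
  unfold Pre_is_in_sub_clause; infer_instance

def pvWitness_is_in_sub_clause : List (List String) × Int := ([["x", "C"], ["LK"]], 2)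

def Spec_is_in_sub_clause (block : List (List String)) (i : Int) (out : Bool) : Prop := out = is_in_sub_clause_alt block i
instance (block : List (List String)) (i : Int) (out : Bool) : Decidable (Spec_is_in_sub_clause block i out) := by unfold Spec_is_in_sub_clause; infer_instance

-- ===== CLAIM (what is proved, stated in full; the proofs are below) =====
def Claim_equal_is_in_sub_clause : Prop := ∀ (block : List (List String)) (i : Int), Dom_is_in_sub_clause block i → Pre_is_in_sub_clause block i → Spec_is_in_sub_clause block i (is_in_sub_clause block i)

-- ===== LEMMAS AND PROOFS =====

-- common reference: A's decision rule read off the REVERSED tag prefix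
def gRev : List String → Bool
  | [] => false
  | t :: ts => if t = "C" then true else if t = "LK" then false else gRev ts

def tagOf (row : List String) : String := (PySem.List.pyGet? row (-1 : Int)).getD ""

-- B's boundary accumulator
def isicBnd (ts : List String) : Int :=
  (PySem.List.enumerate ts 0).foldl (fun b kt => if kt.2 = "LK" then kt.1 else b) (-1)

lemma isicBnd_append (us : List String) (t : String) :
    isicBnd (us ++ [t]) = if t = "LK" then (us.length : Int) else isicBnd us := by
  simp [isicBnd, PySem.List.enumerate_append, PySem.List.enumerate_cons, List.foldl_append]

lemma isicBnd_bounds (ts : List String) :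
    -1 ≤ isicBnd ts ∧ isicBnd ts + 1 ≤ (ts.length : Int) := by
  induction ts using List.reverseRecOn with
  | nil => constructor <;> simp [isicBnd]
  | append_singleton us t ih =>
    rw [isicBnd_append]
    obtain ⟨h1, h2⟩ := ih
    split_ifs <;> (simp; try omega)

lemma bcore_eq (ts : List String) :
    (PySem.List.slice ts (some (isicBnd ts + 1)) none).contains "C" = gRev ts.reverse := by
  induction ts using List.reverseRecOn with
  | nil => decide
  | append_singleton us t ih =>
    rw [isicBnd_append]
    have hb := isicBnd_bounds us
    by_cases hLK : t = "LK"
    · subst hLK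
      rw [if_pos rfl, PySem.List.slice_from _ (by positivity)]
      have : ((us.length : Int) + 1).toNat = us.length + 1 := by omega
      simp [this, gRev]
    · obtain ⟨hb1, hb2⟩ := hb
      rw [if_neg hLK, PySem.List.slice_from _ (by omega : (0:Int) ≤ isicBnd us + 1)]
      rw [PySem.List.slice_from _ (by omega : (0:Int) ≤ isicBnd us + 1)] at ih
      have hle : (isicBnd us + 1).toNat ≤ us.length := by omega
      rw [List.drop_append_of_le_length hle, List.contains_append, ih, List.reverse_append]
      by_cases hC : t = "C"
      · subst hC; simp [gRev]
      · simp [gRev, hC, hLK, Ne.symm hC]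

-- the unprotected-fieldless-row invariant of Pre_, restricted to a prefix length n
def isicInv (block : List (List String)) (n : Nat) : Prop :=
  ∀ k : Nat, k < n → block[k]? = some ([] : List String) →
    ∃ m : Nat, m < n ∧ k < m ∧
      (block[m]?.bind List.getLast? = some "C" ∨
       block[m]?.bind List.getLast? = some "LK")

lemma isicGo_eq (block : List (List String)) :
    ∀ n : Nat, n ≤ block.length → isicInv block n →
    isicGo block n = gRev (((block.take n).map tagOf).reverse) := by
  intro n
  induction n with
  | zero => intro _ _; simp [isicGo, gRev]
  | succ m ih =>
    intro hn hinv
    have hm : m < block.length := by omega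
    have hget : PySem.List.pyGet? block (m : Int) = some block[m] := by
      rw [PySem.List.pyGet?_natCast, List.getElem?_eq_getElem hm]
    by_cases hE : block[m] = []
    · exfalso
      obtain ⟨p, hp2, hp1, _⟩ := hinv m (Nat.lt_succ_self m)
        (by rw [List.getElem?_eq_getElem hm, hE])
      omega
    · have hlast : ∃ t, PySem.List.pyGet? block[m] (-1 : Int) = some t := by
        rw [PySem.List.pyGet?_neg_one]
        exact ⟨block[m].getLast hE, List.getLast?_eq_some_getLast hE⟩
      obtain ⟨t, ht⟩ := hlast
      have htlast : (block[m]).getLast? = some t := by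
        rw [PySem.List.pyGet?_neg_one] at ht; exact ht
      have htag : tagOf block[m] = t := by simp [tagOf, ht]
      have htake : block.take (m + 1) = block.take m ++ [block[m]] := by
        rw [List.take_add_one, List.getElem?_eq_getElem hm]; rfl
      rw [isicGo]
      simp only [hget, ht]
      rw [htake]
      simp only [List.map_append, List.map_cons, List.map_nil, List.reverse_append,
        List.reverse_cons, List.reverse_nil, List.nil_append, List.cons_append, htag]
      rw [gRev]
      split_ifs with h1 h2
      · rfl
      · rfl
      · apply ih (by omega)
        intro k hk hkE
        obtain ⟨p, hp2, hp1, hp3⟩ := hinv k (by omega) hkE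
        have hpm : p ≠ m := by
          intro h; subst h
          rw [List.getElem?_eq_getElem hm, Option.bind_some, htlast] at hp3
          rcases hp3 with h | h <;> (injection h with h; exact (by simp_all))
        exact ⟨p, by omega, hp1, hp3⟩

-- ===== VERDICT (by name: the statement is the Claim_ definition above) =====
theorem is_in_sub_clause_spec : Claim_equal_is_in_sub_clause := by
  intro block i _ hpre
  unfold Spec_is_in_sub_clause is_in_sub_clause is_in_sub_clause_alt
  obtain ⟨hile, hinv⟩ := hpre
  have hmax : 0 ≤ max i 0 := le_max_right _ _
  rw [PySem.List.slice_to _ hmax]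
  have htn : (max i 0).toNat = i.toNat := by omega
  rw [htn]
  have hnat : i.toNat ≤ block.length := by omega
  rw [isicGo_eq block i.toNat hnat hinv, ← bcore_eq]
  rfl
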